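-- pv_equiv track=rewrite | github.com/ssoulistic/AlgorithmAttack | 프로그래머스/2/142085. 디펜스 게임/디펜스 게임.py | solution
-- ===== SOURCE A (Python) =====
-- import heapq
--
-- def solution(n, k, enemy):
--     # heap => 최대힙 => 최대값 k번까지 빼기.
--     # 전체합이 낮을때만 진행.
--     game=[]
--     stage=0
--     while stage<len(enemy):
--         heapq.heappush(game,-enemy[stage])
--         n-=enemy[stage]
--         if n<0:
--             if k>0:
--                 x=heapq.heappop(game)
--                 k-=1
--                 n-=x
--             else:
--                 break
--         stage+=1
--     return stage
-- ===== SOURCE B (Python) =====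
-- def solution(n, k, enemy):
--     # Same result as A on every input; maintains the surviving enemies as an
--     # ascending sorted list (linear insertion) instead of a negated max-heap,
--     # iterates with for/enumerate and early return instead of while/break.
--     survivors = []  # ascending
--     for stage, e in enumerate(enemy):
--         pos = 0
--         while pos < len(survivors) and survivors[pos] < e:
--             pos += 1
--         survivors.insert(pos, e)
--         n -= e
--         if n < 0:
--             if k <= 0:
--                 return stage
--             k -= 1
--             n += survivors.pop()  # remove and refund the largest survivor
--     return len(enemy)
-- ===== Notes on version B (the rewrite author's own statement) =====
-- stated objective: alternative
-- what changed: Replaces the negated max-heap and while/break loop with an ascending sorted list maintained by linear insertion (refund = pop the last element), driven by for/enumerate with early return.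
import Mathlib
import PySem

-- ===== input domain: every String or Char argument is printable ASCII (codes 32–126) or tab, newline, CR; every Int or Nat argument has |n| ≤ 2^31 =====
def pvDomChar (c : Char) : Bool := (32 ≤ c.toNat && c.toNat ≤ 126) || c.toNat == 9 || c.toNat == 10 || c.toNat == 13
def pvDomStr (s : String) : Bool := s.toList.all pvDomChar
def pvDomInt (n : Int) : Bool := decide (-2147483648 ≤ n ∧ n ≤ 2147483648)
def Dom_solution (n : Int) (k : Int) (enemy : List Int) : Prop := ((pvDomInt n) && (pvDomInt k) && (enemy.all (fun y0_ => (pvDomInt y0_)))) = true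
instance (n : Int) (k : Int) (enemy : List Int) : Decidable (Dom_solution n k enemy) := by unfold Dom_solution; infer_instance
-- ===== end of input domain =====

-- B replaces A's negated max-heap + while/break with an ascending sorted list
-- (linear insertion, refund = pop the last element) driven by for/enumerate with
-- early return; same return value on every input (objective: alternative).

-- ===== PORT A =====
-- The heapq heap is ported by its multiset of elements: heappush adds the
-- element, heappop returns the minimum element and erases one occurrence of it.
-- This is exact for the values A computes, since A only ever observes the heap
-- through heappop (the minimum) and A pops only after a push (heap nonempty).
def heapMinA (g : List Int) : Int := (g.min?).getD 0

def solGoA : List Int → Int → Int → Int → List Int → Int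
  | [], stage, _, _, _ => stage
  | e :: rest, stage, n, k, game =>
    let game1 := (-e) :: game          -- heapq.heappush(game, -enemy[stage])
    let n1 := n - e
    if n1 < 0 then
      if k > 0 then
        let x := heapMinA game1        -- x = heapq.heappop(game)
        solGoA rest (stage + 1) (n1 - x) (k - 1) (game1.erase x)
      else stage                       -- break
    else solGoA rest (stage + 1) n1 k game1

def solution (n : Int) (k : Int) (enemy : List Int) : Int := solGoA enemy 0 n k []

-- ===== PORT B =====
-- Source B's linear-scan insertion into the ascending list `survivors`
def insAsc : List Int → Int → List Int
  | [], e => [e]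
  | x :: xs, e => if x < e then x :: insAsc xs e else e :: x :: xs

-- Source B's for-loop; `some stage` is the early `return stage`
def solGoB : List Int → Int → Int → Int → List Int → Option Int
  | [], _, _, _, _ => none
  | e :: rest, stage, n, k, surv =>
    let surv1 := insAsc surv e
    let n1 := n - e
    if n1 < 0 then
      if k ≤ 0 then some stage
      else solGoB rest (stage + 1) (n1 + (surv1.getLast?).getD 0) (k - 1) surv1.dropLast
    else solGoB rest (stage + 1) n1 k surv1

def solution_alt (n : Int) (k : Int) (enemy : List Int) : Int :=
  (solGoB enemy 0 n k []).getD enemy.length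

-- ===== PRECONDITION & SPEC =====
def Spec_solution (n : Int) (k : Int) (enemy : List Int) (out : Int) : Prop := out = solution_alt n k enemy
instance (n : Int) (k : Int) (enemy : List Int) (out : Int) : Decidable (Spec_solution n k enemy out) := by unfold Spec_solution; infer_instance

-- ===== CLAIM (what is proved, stated in full; the proofs are below) =====
def Claim_equal_solution : Prop := ∀ (n : Int) (k : Int) (enemy : List Int), Dom_solution n k enemy → Spec_solution n k enemy (solution n k enemy)

-- ===== LEMMAS AND PROOFS =====

lemma insAsc_perm (e : Int) : ∀ surv : List Int, (insAsc surv e).Perm (e :: surv)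
  | [] => List.Perm.refl _
  | x :: xs => by
    by_cases h : x < e
    · simpa [insAsc, h] using ((insAsc_perm e xs).cons x).trans (List.Perm.swap e x xs)
    · simp [insAsc, h]

lemma insAsc_sorted {surv : List Int} (e : Int) (hs : surv.Pairwise (· ≤ ·)) :
    (insAsc surv e).Pairwise (· ≤ ·) := by
  induction surv with
  | nil => simp [insAsc]
  | cons x xs ih =>
    rcases List.pairwise_cons.mp hs with ⟨hx, hxs⟩
    simp only [insAsc]
    by_cases h : x < e
    · rw [if_pos h]
      refine List.pairwise_cons.mpr ⟨?_, ih hxs⟩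
      intro b hb
      rcases List.mem_cons.mp ((insAsc_perm e xs).mem_iff.mp hb) with rfl | hb
      · exact le_of_lt h
      · exact hx b hb
    · rw [if_neg h]
      refine List.pairwise_cons.mpr ⟨?_, hs⟩
      intro b hb
      rcases List.mem_cons.mp hb with rfl | hb
      · exact not_lt.mp h
      · exact le_trans (not_lt.mp h) (hx b hb)

lemma insAsc_ne_nil (surv : List Int) (e : Int) : insAsc surv e ≠ [] := by
  cases surv with
  | nil => simp [insAsc]
  | cons x xs => by_cases h : x < e <;> simp [insAsc, h]

lemma sorted_le_getLast {s : List Int} (hs : s.Pairwise (· ≤ ·)) (h : s ≠ []) :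
    ∀ b ∈ s, b ≤ s.getLast h := by
  intro b hb
  have := List.dropLast_append_getLast h
  rcases (List.mem_append.mp (this ▸ hb)) with hb' | hb'
  · have hpair := hs
    rw [← this] at hpair
    have := (List.pairwise_append.mp hpair).2.2 b hb' _ (List.mem_singleton_self _)
    exact this
  · exact le_of_eq (List.mem_singleton.mp hb')

-- the minimum of the negations is minus the last (largest) element
lemma min_neg_eq {s : List Int} (hs : s.Pairwise (· ≤ ·)) (h : s ≠ []) :
    (s.map (fun x => -x)).min? = some (-(s.getLast h)) := by
  rw [List.min?_eq_some_iff]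
  constructor
  · exact List.mem_map.mpr ⟨s.getLast h, List.getLast_mem h, rfl⟩
  · intro b hb
    rcases List.mem_map.mp hb with ⟨a, ha, rfl⟩
    exact neg_le_neg (sorted_le_getLast hs h a ha)

lemma heapMinA_perm {g₁ g₂ : List Int} (hp : g₁.Perm g₂) : heapMinA g₁ = heapMinA g₂ := by
  unfold heapMinA
  cases hmin : g₂.min? with
  | none =>
    have h2 : g₂ = [] := List.min?_eq_none_iff.mp hmin
    subst h2
    rw [List.Perm.eq_nil hp]
    rfl
  | some m =>
    rcases List.min?_eq_some_iff.mp hmin with ⟨hm, hall⟩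
    have : g₁.min? = some m := by
      rw [List.min?_eq_some_iff]
      exact ⟨hp.mem_iff.mpr hm, fun b hb => hall b (hp.mem_iff.mp hb)⟩
    simp [this]

lemma go_eq : ∀ (rest : List Int) (stage n k : Int) (game surv : List Int),
    surv.Pairwise (· ≤ ·) → game.Perm (surv.map (fun x => -x)) →
    solGoA rest stage n k game = (solGoB rest stage n k surv).getD (stage + rest.length) := by
  intro rest
  induction rest with
  | nil => intro stage n k game surv _ _; simp [solGoA, solGoB]
  | cons e rest ih =>
    intro stage n k game surv hs hp
    have hperm1 : ((-e) :: game).Perm ((insAsc surv e).map (fun x => -x)) := by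
      have h1 : ((insAsc surv e).map (fun x => -x)).Perm ((-e) :: surv.map (fun x => -x)) := by
        simpa using (insAsc_perm e surv).map (fun x => -x)
      exact ((hp.cons (-e)).trans h1.symm)
    have hs1 : (insAsc surv e).Pairwise (· ≤ ·) := insAsc_sorted e hs
    have hne : insAsc surv e ≠ [] := insAsc_ne_nil surv e
    simp only [solGoA, solGoB]
    by_cases hneg : n - e < 0
    · simp only [hneg, if_true]
      by_cases hk : k > 0
      · have hk' : ¬ k ≤ 0 := not_le.mpr hk
        simp only [hk, hk', if_true, if_false]
        -- identify the popped value
        set M := (insAsc surv e).getLast hne with hM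
        have hminv : heapMinA ((-e) :: game) = -M := by
          rw [heapMinA_perm hperm1]
          unfold heapMinA
          rw [min_neg_eq hs1 hne]
          rfl
        have hlast? : ((insAsc surv e).getLast?).getD 0 = M := by
          rw [List.getLast?_eq_some_getLast hne]
          rfl
        -- multiset invariant after the pop
        have hsplit : (insAsc surv e).dropLast ++ [M] = insAsc surv e :=
          List.dropLast_append_getLast hne
        have herase : (((-e) :: game).erase (-M)).Perm
            (((insAsc surv e).dropLast).map (fun x => -x)) := by
          have h2 := hperm1.erase (-M)
          have h3 : ((insAsc surv e).map (fun x => -x)).erase (-M)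
              = ((insAsc surv e).erase M).map (fun x => -x) := by
            exact (List.map_erase (fun a b h => by omega) _).symm
          have h4 : ((insAsc surv e).erase M).Perm ((insAsc surv e).dropLast) := by
            have h5 : (insAsc surv e).Perm (M :: (insAsc surv e).dropLast) := by
              conv_lhs => rw [← hsplit]
              exact List.perm_append_singleton M _
            have := h5.erase M
            simpa using this
          exact h2.trans (h3 ▸ (h4.map (fun x => -x)))
        have hsd : ((insAsc surv e).dropLast).Pairwise (· ≤ ·) :=
          hs1.sublist (List.dropLast_sublist _)
        rw [hminv, hlast?]
        have := ih (stage + 1) (n - e - -M) (k - 1) (((-e) :: game).erase (-M))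
          ((insAsc surv e).dropLast) hsd herase
        rw [this]
        have harith : n - e - -M = n - e + M := by ring
        rw [harith]
        congr 1
        simp only [List.length_cons]
        push_cast
        ring
      · have hk' : k ≤ 0 := not_lt.mp hk
        simp [hk, hk']
    · simp only [hneg, if_false]
      rw [ih (stage + 1) (n - e) k ((-e) :: game) (insAsc surv e) hs1 hperm1]
      congr 1
      simp only [List.length_cons]
      push_cast
      ring

-- ===== VERDICT (by name: the statement is the Claim_ definition above) =====
theorem solution_spec : Claim_equal_solution := by
  intro n k enemy _
  unfold Spec_solution solution solution_alt
  rw [go_eq enemy 0 n k [] [] List.Pairwise.nil (by simp)]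
  norm_num
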